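-- pv_equiv track=rewrite | github.com/MichaelDSa/pbj | pbj.py | remove_duplicate_values
-- ===== SOURCE A (Python) =====
-- from typing import Dict, OrderedDict, Tuple, Dict
--
-- def remove_duplicate_values(bookmarks: Dict[str, Dict[str, str]]) -> Dict[str, Dict[str, str]]:
--     found_dups: set[str] = set()
--     duplicates: Dict[str, str] = {}
--     all_duplicates: Dict[str, Dict[str, str]] = {}
--     for category, item in bookmarks.items():
--         duplicates.clear()
--         found_dups.clear()
--         # catch all duplicate values
--         for key, path in item.items():
--             if path in found_dups:
--                 duplicates[key] = path
--             else:
--                 found_dups.add(path)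
--         # save duplicates for reporting
--         if len(duplicates) > 0:
--             for k, p in duplicates.items():
--                 all_duplicates.setdefault(category, {})[k] = p
--
--         # delete found duplicates from bookmarks
--         for key in duplicates:
--             del bookmarks[category][key]
--     # return the found duplicates for reporting
--     return all_duplicates
-- ===== SOURCE B (Python) =====
-- def remove_duplicate_values(bookmarks):
--     all_duplicates = {}
--     for category, item in bookmarks.items():
--         # index: path -> key of its first occurrence
--         first_key = {}
--         for key, path in item.items():
--             first_key.setdefault(path, key)
--         # a pair is a duplicate iff its key is not the first key for its path
--         dups = {k: p for k, p in item.items() if first_key.get(p) != k}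
--         if dups:
--             all_duplicates[category] = dups
--             for k in dups:
--                 del bookmarks[category][k]
--     return all_duplicates
-- ===== Notes on version B (the rewrite author's own statement) =====
-- stated objective: alternative
-- what changed: B replaces A's running seen-set/duplicate-accumulator scan with a two-phase per-category index: it first builds a path->first-key index, then selects duplicates with a single filter comprehension (key != first key for its path) and assigns the result directly, instead of flagging entries during the scan and merging them entry-by-entry via setdefault.
import Mathlib
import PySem

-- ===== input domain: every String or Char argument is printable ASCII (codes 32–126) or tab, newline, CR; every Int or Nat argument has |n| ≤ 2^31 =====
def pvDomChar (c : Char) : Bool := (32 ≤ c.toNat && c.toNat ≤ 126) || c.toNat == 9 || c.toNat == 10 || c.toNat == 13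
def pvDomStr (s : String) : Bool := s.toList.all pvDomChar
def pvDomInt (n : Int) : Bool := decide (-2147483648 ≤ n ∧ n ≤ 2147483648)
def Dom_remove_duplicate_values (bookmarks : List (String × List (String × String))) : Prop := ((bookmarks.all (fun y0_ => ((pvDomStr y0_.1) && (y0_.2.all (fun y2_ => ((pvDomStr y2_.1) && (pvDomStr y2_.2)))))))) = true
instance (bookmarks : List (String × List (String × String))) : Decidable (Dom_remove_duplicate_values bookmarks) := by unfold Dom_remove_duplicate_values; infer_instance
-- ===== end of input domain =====

-- B replaces A's running seen-set scan with a path->first-key index plus one filter; same cost, different decomposition.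
-- Both Pythons also prune the duplicates from `bookmarks` in place (identically); the theorems below are about the RETURN value only.

-- ===== PORT A =====
-- inner-loop body: `if path in found_dups: duplicates[key] = path else: found_dups.add(path)`
def dupStep (st : PySem.Dict String String × PySem.Set String) (kp : String × String) :
    PySem.Dict String String × PySem.Set String :=
  if st.2.contains kp.2 then (st.1.insert kp.1 kp.2, st.2) else (st.1, PySem.Set.add st.2 kp.2)

-- the inner loop: `duplicates` after scanning one category's items (found_dups/duplicates start cleared)
def catDups (item : List (String × String)) : PySem.Dict String String :=
  (item.foldl dupStep (PySem.Dict.empty, PySem.Set.ofList [])).1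

-- `all_duplicates.setdefault(category, {})[k] = p`
def reportStep (c : String) (acc : PySem.Dict String (PySem.Dict String String))
    (kp : String × String) : PySem.Dict String (PySem.Dict String String) :=
  acc.modify c PySem.Dict.empty (fun inner => inner.insert kp.1 kp.2)

def remove_duplicate_values (bookmarks : List (String × List (String × String))) :
    List (String × List (String × String)) :=
  (bookmarks.foldl
      (fun all ci =>
        let dups := catDups ci.2
        if dups.size > 0 then dups.items.foldl (reportStep ci.1) all else all)
      PySem.Dict.empty).items.map (fun cd => (cd.1, cd.2.items))

-- ===== PORT B =====
-- `first_key.setdefault(path, key)` over the items: path -> key of its first occurrence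
def pbj_first_key (item : List (String × String)) : PySem.Dict String String :=
  item.foldl (fun d kp => d.setdefault kp.2 kp.1) PySem.Dict.empty

-- `{k: p for k, p in item.items() if first_key.get(p) != k}`
def pbj_dups (item : List (String × String)) : List (String × String) :=
  item.filter (fun kp => (pbj_first_key item).get? kp.2 != some kp.1)

def remove_duplicate_values_alt (bookmarks : List (String × List (String × String))) :
    List (String × List (String × String)) :=
  (bookmarks.map (fun ci => (ci.1, pbj_dups ci.2))).filter (fun cd => !cd.2.isEmpty)

-- ===== PRECONDITION & SPEC =====
-- Pre_ requires pairwise-distinct category names and pairwise-distinct keys inside each category: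
-- the argument models a Python dict of dicts, which cannot hold duplicate keys, so no actual
-- Python input is excluded.
def Pre_remove_duplicate_values (bookmarks : List (String × List (String × String))) : Prop :=
  (bookmarks.map Prod.fst).Nodup ∧ ∀ ci ∈ bookmarks, (ci.2.map Prod.fst).Nodup
instance (bookmarks : List (String × List (String × String))) : Decidable (Pre_remove_duplicate_values bookmarks) := by unfold Pre_remove_duplicate_values; infer_instance

def pvWitness_remove_duplicate_values : (List (String × List (String × String))) :=
  [("misc", [("k1", "p"), ("k2", "p"), ("k3", "q")]), ("work", [("k1", "r")])]

def Spec_remove_duplicate_values (bookmarks : List (String × List (String × String))) (out : List (String × List (String × String))) : Prop := out = remove_duplicate_values_alt bookmarks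
instance (bookmarks : List (String × List (String × String))) (out : List (String × List (String × String))) : Decidable (Spec_remove_duplicate_values bookmarks out) := by unfold Spec_remove_duplicate_values; infer_instance

-- ===== CLAIM (what is proved, stated in full; the proofs are below) =====
def Claim_equal_remove_duplicate_values : Prop := ∀ (bookmarks : List (String × List (String × String))), Dom_remove_duplicate_values bookmarks → Pre_remove_duplicate_values bookmarks → Spec_remove_duplicate_values bookmarks (remove_duplicate_values bookmarks)

-- ===== LEMMAS AND PROOFS =====

-- the predicate A's inner scan effectively applies, relative to a pre-seeded seen-set `found`
def pvP (found : PySem.Set String) (item : List (String × String)) (kp : String × String) : Bool :=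
  found.contains kp.2 || ((item.find? (fun q => q.2 == kp.2)).map Prod.fst != some kp.1)

lemma fk_get (item : List (String × String)) (d : PySem.Dict String String) (p : String) :
    (item.foldl (fun d kp => d.setdefault kp.2 kp.1) d).get? p
      = (d.get? p).or ((item.find? (fun q => q.2 == p)).map Prod.fst) := by
  induction item generalizing d with
  | nil => cases h : d.get? p <;> simp [Option.or, h]
  | cons kp rest ih =>
    simp only [List.foldl_cons, List.find?_cons]
    by_cases hp : kp.2 = p
    · subst hp
      rw [ih]
      rw [PySem.Dict.get?_setdefault_self]
      cases d.get? kp.2 <;> simp [Option.or]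
    · have hbq : (kp.2 == p) = false := by simp [hp]
      rw [ih, PySem.Dict.get?_setdefault_of_ne _ _ (Ne.symm hp), hbq]

lemma inner_go (item : List (String × String)) (dups : PySem.Dict String String)
    (found : PySem.Set String)
    (hk : (item.map Prod.fst).Nodup)
    (hd : ∀ kp ∈ item, dups.contains kp.1 = false) :
    (item.foldl dupStep (dups, found)).1.items = dups.items ++ item.filter (pvP found item) := by
  induction item generalizing dups found with
  | nil => simp
  | cons kp rest ih =>
    simp only [List.map_cons, List.nodup_cons] at hk
    obtain ⟨hknot, hknd⟩ := hk
    have hdk : dups.contains kp.1 = false := hd kp (List.mem_cons_self ..)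
    simp only [List.foldl_cons, dupStep]
    by_cases hb : found.contains kp.2
    · have hbm : kp.2 ∈ found := by simpa using hb
      rw [if_pos hb]
      have hd' : ∀ q ∈ rest, (dups.insert kp.1 kp.2).contains q.1 = false := by
        intro q hq
        rw [PySem.Dict.contains_insert]
        have : q.1 ≠ kp.1 := by
          intro h; exact hknot (h ▸ List.mem_map_of_mem hq)
        simp [this, hd q (List.mem_cons_of_mem _ hq)]
      rw [ih _ _ hknd hd']
      rw [PySem.Dict.items_insert_of_not_contains _ _ hdk]
      have hfilt : rest.filter (pvP found rest) = rest.filter (pvP found (kp :: rest)) := by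
        apply List.filter_congr
        intro q hq
        by_cases hpq : kp.2 = q.2
        · have hm : q.2 ∈ found := hpq ▸ hbm
          simp [pvP, hm]
        · have hne : (kp.2 == q.2) = false := by simp [hpq]
          simp [pvP, hne]
      have hhead : pvP found (kp :: rest) kp = true := by
        simp [pvP, hbm]
      simp [hhead, hfilt, List.append_assoc]
    · have hbm : kp.2 ∉ found := by simpa using hb
      rw [if_neg hb]
      have hd' : ∀ q ∈ rest, dups.contains q.1 = false :=
        fun q hq => hd q (List.mem_cons_of_mem _ hq)
      rw [ih _ _ hknd hd']
      have hhead : pvP found (kp :: rest) kp = false := by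
        simp [pvP, hbm]
      have hfilt : rest.filter (pvP (PySem.Set.add found kp.2) rest)
          = rest.filter (pvP found (kp :: rest)) := by
        apply List.filter_congr
        intro q hq
        by_cases hpq : kp.2 = q.2
        · have hq1 : q.1 ≠ kp.1 := by
            intro h; exact hknot (h ▸ List.mem_map_of_mem hq)
          have hm : q.2 ∈ PySem.Set.add found kp.2 :=
            (PySem.Set.mem_add found kp.2 q.2).mpr (Or.inr hpq.symm)
          have hfc : q.2 ∉ found := hpq ▸ hbm
          have hbq : (kp.2 == q.2) = true := by simp [hpq]
          simp [pvP, hm, hfc, hbq, Ne.symm hq1]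
        · have hm : q.2 ∈ PySem.Set.add found kp.2 ↔ q.2 ∈ found := by
            rw [PySem.Set.mem_add]
            simp [Ne.symm hpq]
          have hbq : (kp.2 == q.2) = false := by simp [hpq]
          simp [pvP, hm, hbq]
      simp [hhead, hfilt]

-- A's inner loop computes exactly B's filtered duplicate list (distinct keys per category)
lemma catDups_items (item : List (String × String)) (hk : (item.map Prod.fst).Nodup) :
    (catDups item).items = pbj_dups item := by
  unfold catDups pbj_dups
  rw [inner_go item PySem.Dict.empty (PySem.Set.ofList []) hk (by intro kp _; rfl)]
  rw [show (PySem.Dict.empty : PySem.Dict String String).items = [] from rfl, List.nil_append]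
  apply List.filter_congr
  intro kp _
  rw [show pbj_first_key item
      = item.foldl (fun d kp => d.setdefault kp.2 kp.1) PySem.Dict.empty from rfl]
  rw [fk_get item PySem.Dict.empty kp.2]
  rw [show (PySem.Dict.empty : PySem.Dict String String).get? kp.2 = none from rfl]
  simp [pvP, PySem.Set.ofList, Option.or]

lemma report_loop_ins (c : String) (pairs : List (String × String))
    (a : PySem.Dict String (PySem.Dict String String)) (X : PySem.Dict String String) :
    pairs.foldl (reportStep c) (a.insert c X)
      = a.insert c (pairs.foldl (fun d kp => d.insert kp.1 kp.2) X) := by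
  induction pairs generalizing X with
  | nil => simp
  | cons kp rest ih =>
    simp only [List.foldl_cons, reportStep, PySem.Dict.modify]
    rw [PySem.Dict.getD_insert_self, PySem.Dict.insert_insert_self, ih]

lemma report_loop (c : String) (pairs : List (String × String)) (hne : pairs ≠ [])
    (a : PySem.Dict String (PySem.Dict String String)) (hc : a.contains c = false) :
    pairs.foldl (reportStep c) a
      = a.insert c (pairs.foldl (fun d kp => d.insert kp.1 kp.2) PySem.Dict.empty) := by
  cases pairs with
  | nil => exact absurd rfl hne
  | cons kp rest =>
    simp only [List.foldl_cons, reportStep, PySem.Dict.modify]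
    rw [PySem.Dict.getD_of_not_contains _ _ hc]
    exact report_loop_ins c rest a _

lemma refold_items (pairs : List (String × String)) (hk : (pairs.map Prod.fst).Nodup) :
    (pairs.foldl (fun d kp => d.insert kp.1 kp.2) (PySem.Dict.empty : PySem.Dict String String)).items
      = pairs := by
  rw [PySem.Dict.items_foldl_insert_fresh pairs Prod.fst Prod.snd PySem.Dict.empty
      (by intro a _; rfl) hk]
  rw [show (PySem.Dict.empty : PySem.Dict String String).items = [] from rfl, List.nil_append]
  simp

lemma outer_go (bs : List (String × List (String × String)))
    (a : PySem.Dict String (PySem.Dict String String))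
    (hfresh : ∀ ci ∈ bs, a.contains ci.1 = false)
    (hnd : (bs.map Prod.fst).Nodup)
    (hin : ∀ ci ∈ bs, (ci.2.map Prod.fst).Nodup) :
    (bs.foldl
        (fun all ci =>
          let dups := catDups ci.2
          if dups.size > 0 then dups.items.foldl (reportStep ci.1) all else all)
        a).items.map (fun cd => (cd.1, cd.2.items))
      = a.items.map (fun cd => (cd.1, cd.2.items))
        ++ (bs.map (fun ci => (ci.1, pbj_dups ci.2))).filter (fun cd => !cd.2.isEmpty) := by
  induction bs generalizing a with
  | nil => simp
  | cons ci rest ih =>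
    simp only [List.map_cons, List.nodup_cons] at hnd
    obtain ⟨hcnot, hcnd⟩ := hnd
    have hkci : (ci.2.map Prod.fst).Nodup := hin ci (List.mem_cons_self ..)
    have hitems : (catDups ci.2).items = pbj_dups ci.2 := catDups_items ci.2 hkci
    have hsize : (catDups ci.2).size = (pbj_dups ci.2).length := by
      simp [PySem.Dict.size, hitems]
    simp only [List.foldl_cons]
    by_cases hemp : pbj_dups ci.2 = []
    · have hz : ¬ (catDups ci.2).size > 0 := by simp [hsize, hemp]
      simp only [hz, if_false]
      rw [ih a (fun q hq => hfresh q (List.mem_cons_of_mem _ hq)) hcnd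
        (fun q hq => hin q (List.mem_cons_of_mem _ hq))]
      simp [hemp]
    · have hz : (catDups ci.2).size > 0 := by
        simp only [hsize]
        exact List.length_pos_of_ne_nil hemp
      simp only [hz, if_true]
      have hfc : a.contains ci.1 = false := hfresh ci (List.mem_cons_self ..)
      rw [hitems, report_loop ci.1 (pbj_dups ci.2) hemp a hfc]
      have hdnd : ((pbj_dups ci.2).map Prod.fst).Nodup := by
        have hsub : List.Sublist ((pbj_dups ci.2).map Prod.fst) (ci.2.map Prod.fst) :=
          List.Sublist.map Prod.fst List.filter_sublist
        exact hkci.sublist hsub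
      have hfresh' : ∀ q ∈ rest,
          (a.insert ci.1 (PySem.Dict.mk (pbj_dups ci.2))).contains q.1 = false := by
        intro q hq
        rw [PySem.Dict.contains_insert]
        have : q.1 ≠ ci.1 := by
          intro h; exact hcnot (h ▸ List.mem_map_of_mem hq)
        simp [this, hfresh q (List.mem_cons_of_mem _ hq)]
      have hD : (pbj_dups ci.2).foldl (fun d kp => d.insert kp.1 kp.2)
          (PySem.Dict.empty : PySem.Dict String String) = PySem.Dict.mk (pbj_dups ci.2) := by
        apply PySem.Dict.ext
        rw [refold_items _ hdnd]
      rw [hD]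
      rw [ih _ hfresh' hcnd (fun q hq => hin q (List.mem_cons_of_mem _ hq))]
      rw [PySem.Dict.items_insert_of_not_contains _ _ hfc]
      have hne' : ¬ (pbj_dups ci.2).isEmpty := by simp [hemp]
      simp [hne', List.append_assoc]

-- ===== VERDICT (by name: the statement is the Claim_ definition above) =====
theorem remove_duplicate_values_spec : Claim_equal_remove_duplicate_values := by
  intro bookmarks _ hpre
  obtain ⟨hnd, hin⟩ := hpre
  unfold Spec_remove_duplicate_values remove_duplicate_values remove_duplicate_values_alt
  rw [outer_go bookmarks PySem.Dict.empty (by intro ci _; rfl) hnd hin]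
  rw [show (PySem.Dict.empty : PySem.Dict String (PySem.Dict String String)).items = [] from rfl]
  simp
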